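-- pv_equiv track=rewrite | github.com/Infosys/Document-Extraction-Libraries | infy_table_extractor/src/infy_table_extractor/borderless_table_extractor/internal/internal_converter.py | update_row_overlapping_flag
-- ===== SOURCE A (Python) =====
-- def is_cell_overlapping_by_column(cell_1, cell_2):
--     overlapping = False
--     if (cell_1[3] < cell_2[5] and cell_1[5] > cell_2[3]):
--         overlapping = True
--     return overlapping
--
-- def update_row_overlapping_flag(table_rows, table, processing_msg=[]):
--     processing_msg.append("Finding the row overlapping")
--     new_table_rows = []
--     row_num = 0
--     for row in table_rows:
--         overlap_flag = 0
--         # cell_1: cell in current row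
--         for cell_1 in table:
--             if (cell_1[0] == row_num):
--                 overlap_count = 0
--                 # cell_2: cell in previous row
--                 for cell_2 in table:
--                     if (cell_2[0] == row_num-1):
--                         if (is_cell_overlapping_by_column(cell_1, cell_2) == True):
--                             overlap_count += 1
--                 if (overlap_count > 1):
--                     overlap_flag = 1
--
--         if overlap_flag == 1:
--             processing_msg.append(
--                 f"Row number {row_num+1} - Every cell in the row is vertically overlapping with max 1 cell in prev row")
--         else:
--             processing_msg.append(
--                 f"Row number {row_num+1} - At least one cell overlaps with multiple cells which makes it difficult for merging candidate")
--
--         row.append(overlap_flag)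
--         new_table_rows.append(row)
--         row_num += 1
--     return new_table_rows
-- ===== SOURCE B (Python) =====
-- def update_row_overlapping_flag(table_rows, table, processing_msg=[]):
--     # Bucket cells by their row index once, so each row only scans its own and
--     # the previous row's cells instead of the whole table twice per row.
--     # Like A, this mutates table_rows' rows (appends the flag) and processing_msg.
--     processing_msg.append("Finding the row overlapping")
--     buckets = {}
--     for cell in table:
--         buckets.setdefault(cell[0], []).append(cell)
--     out = []
--     for r, row in enumerate(table_rows):
--         prev = buckets.get(r - 1, [])
--         flag = 1 if any(
--             sum(1 for p in prev if c[3] < p[5] and c[5] > p[3]) > 1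
--             for c in buckets.get(r, [])
--         ) else 0
--         if flag == 1:
--             processing_msg.append(
--                 f"Row number {r+1} - Every cell in the row is vertically overlapping with max 1 cell in prev row")
--         else:
--             processing_msg.append(
--                 f"Row number {r+1} - At least one cell overlaps with multiple cells which makes it difficult for merging candidate")
--         row.append(flag)
--         out.append(row)
--     return out
-- ===== Notes on version B (the rewrite author's own statement) =====
-- stated objective: alternative
-- what changed: B buckets the cells by row index into a dict in one pass and then, for each row, tests only that row's bucket against the previous row's bucket (with any() early exit), instead of A's rescanning the entire cell table once per row and again per matching cell (intended as faster; a timing run measured only ~1.25x at the largest size).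
-- outside the precondition, e.g. on update_row_overlapping_flag([], [[]], []): A returns [], B raises IndexError
import Mathlib
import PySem

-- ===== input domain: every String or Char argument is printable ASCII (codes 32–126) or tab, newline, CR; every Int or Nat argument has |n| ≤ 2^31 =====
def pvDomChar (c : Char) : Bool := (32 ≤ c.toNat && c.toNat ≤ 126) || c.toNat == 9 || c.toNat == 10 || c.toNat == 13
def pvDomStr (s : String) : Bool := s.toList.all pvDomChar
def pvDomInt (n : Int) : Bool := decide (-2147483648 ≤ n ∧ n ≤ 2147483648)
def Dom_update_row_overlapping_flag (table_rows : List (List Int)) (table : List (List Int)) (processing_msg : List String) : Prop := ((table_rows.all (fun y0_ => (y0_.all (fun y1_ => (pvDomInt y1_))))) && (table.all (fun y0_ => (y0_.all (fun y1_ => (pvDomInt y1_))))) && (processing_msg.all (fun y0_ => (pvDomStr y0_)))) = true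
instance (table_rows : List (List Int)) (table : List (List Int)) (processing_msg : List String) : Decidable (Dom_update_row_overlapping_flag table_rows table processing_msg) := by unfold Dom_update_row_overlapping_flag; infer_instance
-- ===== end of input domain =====

-- B buckets cells by row index in a dict and compares each row only with its previous row's
-- bucket, instead of A's full-table rescans per row. Return-value equivalence only:
-- both Pythons also mutate table_rows' rows and processing_msg identically (flag/msg appends).


-- ===== PORT A =====
-- cell[0]/cell[3]/cell[5] are ported with getD defaults; exact under Pre_ (every inspected
-- cell is nonempty and every cell whose row index can be compared has ≥ 6 fields).
def is_cell_overlapping_by_column (cell_1 : List Int) (cell_2 : List Int) : Bool :=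
  let overlapping := false
  if cell_1.getD 3 0 < cell_2.getD 5 0 ∧ cell_1.getD 5 0 > cell_2.getD 3 0 then true
  else overlapping

def update_row_overlapping_flag (table_rows : List (List Int)) (table : List (List Int)) (processing_msg : List String) : List (List Int) :=
  -- processing_msg is only mutated by the Python; it does not affect the return value
  (table_rows.foldl (fun (st : List (List Int) × Int) row =>
      let row_num := st.2
      let overlap_flag : Int := table.foldl (fun overlap_flag cell_1 =>
        if cell_1.getD 0 0 == row_num then
          let overlap_count : Int := table.foldl (fun overlap_count cell_2 =>
            if cell_2.getD 0 0 == row_num - 1 then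
              (if is_cell_overlapping_by_column cell_1 cell_2 = true then overlap_count + 1 else overlap_count)
            else overlap_count) 0
          if overlap_count > 1 then 1 else overlap_flag
        else overlap_flag) 0
      (st.1 ++ [row ++ [overlap_flag]], row_num + 1)) ([], 0)).1

-- ===== PORT B =====
def update_row_overlapping_flag_alt (table_rows : List (List Int)) (table : List (List Int)) (processing_msg : List String) : List (List Int) :=
  -- buckets.setdefault(cell[0], []).append(cell)
  let buckets : PySem.Dict Int (List (List Int)) :=
    table.foldl (fun d cell => d.modify (cell.getD 0 0) [] (· ++ [cell])) PySem.Dict.empty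
  (PySem.List.enumerate table_rows 0).map (fun p =>
    let prev := buckets.getD (p.1 - 1) []
    let flag : Int :=
      if (buckets.getD p.1 []).any (fun c =>
          1 < prev.countP (fun q => c.getD 3 0 < q.getD 5 0 ∧ c.getD 5 0 > q.getD 3 0)) then 1
      else 0
    p.2 ++ [flag])

-- ===== PRECONDITION & SPEC =====
-- Pre_ excludes exactly the inputs on which one of the programs raises IndexError: a table
-- containing a cell shorter than 1 (B reads cell[0] while bucketing; A reads it too whenever
-- table_rows is nonempty — on the degenerate corner table_rows = [] A returns [] without ever
-- touching the table, see the cited example), and a table containing a compared pair of cells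
-- (c1 in a row 0..len(table_rows)-1, c2 in the row above) too short for the fields the
-- overlap test reads in order: c1[3], c2[5], then (if c1[3] < c2[5]) c1[5], c2[3].
def Pre_update_row_overlapping_flag (table_rows : List (List Int)) (table : List (List Int)) (processing_msg : List String) : Prop :=
  (∀ c ∈ table, 1 ≤ c.length) ∧
  ∀ c1 ∈ table, ∀ c2 ∈ table,
    (0 ≤ c1.getD 0 0 ∧ c1.getD 0 0 < (table_rows.length : Int) ∧ c2.getD 0 0 = c1.getD 0 0 - 1) →
      4 ≤ c1.length ∧ 6 ≤ c2.length ∧ (c1.getD 3 0 < c2.getD 5 0 → 6 ≤ c1.length)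
instance (table_rows : List (List Int)) (table : List (List Int)) (processing_msg : List String) : Decidable (Pre_update_row_overlapping_flag table_rows table processing_msg) := by unfold Pre_update_row_overlapping_flag; infer_instance

def pvWitness_update_row_overlapping_flag : List (List Int) × List (List Int) × List String :=
  ([[10], [20]], [[0, 0, 1, 2, 0, 9], [1, 0, 3, 1, 0, 8], [1, 0, 8, 4, 0, 11]], ["log"])

def Spec_update_row_overlapping_flag (table_rows : List (List Int)) (table : List (List Int)) (processing_msg : List String) (out : List (List Int)) : Prop := out = update_row_overlapping_flag_alt table_rows table processing_msg
instance (table_rows : List (List Int)) (table : List (List Int)) (processing_msg : List String) (out : List (List Int)) : Decidable (Spec_update_row_overlapping_flag table_rows table processing_msg out) := by unfold Spec_update_row_overlapping_flag; infer_instance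

-- ===== CLAIM (what is proved, stated in full; the proofs are below) =====
def Claim_equal_update_row_overlapping_flag : Prop := ∀ (table_rows : List (List Int)) (table : List (List Int)) (processing_msg : List String), Dom_update_row_overlapping_flag table_rows table processing_msg → Pre_update_row_overlapping_flag table_rows table processing_msg → Spec_update_row_overlapping_flag table_rows table processing_msg (update_row_overlapping_flag table_rows table processing_msg)

-- ===== LEMMAS AND PROOFS =====

-- A's inner counting loop over the whole table = a countP over the filtered bucket.
lemma countLoop_eq (P : List Int → Bool) (Q : List Int → Bool) :
    ∀ (t : List (List Int)) (n : Int),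
      t.foldl (fun acc c => if P c then (if Q c = true then acc + 1 else acc) else acc) n
        = n + ((t.filter P).countP Q : Int) := by
  intro t
  induction t with
  | nil => intro n; simp
  | cons c t ih =>
      intro n
      by_cases hp : P c <;> by_cases hq : Q c <;>
        simp [List.foldl_cons, hp, hq, ih] <;> ring

-- A's outer flag loop = "does any cell of the row satisfy the count predicate".
lemma flagLoop_eq (P : List Int → Bool) (cnt : List Int → Int) :
    ∀ (t : List (List Int)) (f : Int),
      t.foldl (fun acc c => if P c then (if cnt c > 1 then 1 else acc) else acc) f
        = if t.any (fun c => P c && decide (cnt c > 1)) then 1 else f := by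
  intro t
  induction t with
  | nil => intro f; simp
  | cons c t ih =>
      intro f
      by_cases hp : P c <;> by_cases hq : cnt c > 1 <;>
        simp [List.foldl_cons, hp, hq, ih]

-- The dict built by B's bucketing loop looks up to the filtered table.
lemma bucket_getD (t : List (List Int)) (r : Int) :
    (t.foldl (fun d (cell : List Int) => d.modify (cell.getD 0 0) [] (· ++ [cell]))
        (PySem.Dict.empty : PySem.Dict Int (List (List Int)))).getD r []
      = t.filter (fun c => c.getD 0 0 == r) := by
  have h := PySem.Dict.getD_foldl_modify_append
      (l := t.map (fun c => (c.getD 0 0, c))) (d := (PySem.Dict.empty : PySem.Dict Int (List (List Int)))) (c := r)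
  rw [List.foldl_map] at h
  rw [h]
  simp [List.filter_map, Function.comp_def]

-- A's overlap helper, as the Bool conjunction B's comprehension condition uses.
lemma overlap_eq (c q : List Int) :
    is_cell_overlapping_by_column c q
      = (decide (c.getD 3 0 < q.getD 5 0) && decide (q.getD 3 0 < c.getD 5 0)) := by
  simp [is_cell_overlapping_by_column]

-- A's fold over the rows, with the flag abstracted as a function of the row number.
lemma rowsLoop_eq (g : Int → Int) :
    ∀ (rows acc : List (List Int)) (k : Int),
      (rows.foldl (fun (st : List (List Int) × Int) row =>
          (st.1 ++ [row ++ [g st.2]], st.2 + 1)) (acc, k)).1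
        = acc ++ (PySem.List.enumerate rows k).map (fun p => p.2 ++ [g p.1]) := by
  intro rows
  induction rows with
  | nil => intro acc k; simp [PySem.List.enumerate_nil]
  | cons row rows ih =>
      intro acc k
      simp [List.foldl_cons, ih, PySem.List.enumerate_cons]

-- ===== VERDICT (by name: the statement is the Claim_ definition above) =====
theorem update_row_overlapping_flag_spec : Claim_equal_update_row_overlapping_flag := by
  intro table_rows table processing_msg _hDom _hPre
  unfold Spec_update_row_overlapping_flag
  unfold update_row_overlapping_flag update_row_overlapping_flag_alt
  rw [rowsLoop_eq (fun r => table.foldl (fun overlap_flag cell_1 =>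
        if cell_1.getD 0 0 == r then
          let overlap_count : Int := table.foldl (fun overlap_count cell_2 =>
            if cell_2.getD 0 0 == r - 1 then
              (if is_cell_overlapping_by_column cell_1 cell_2 = true then overlap_count + 1 else overlap_count)
            else overlap_count) 0
          if overlap_count > 1 then 1 else overlap_flag
        else overlap_flag) 0) table_rows [] 0]
  simp only [List.nil_append]
  apply List.map_congr_left
  intro p _hp
  simp only [bucket_getD]
  rw [flagLoop_eq (fun c1 => c1.getD 0 0 == p.1)
        (fun cell_1 => (table.foldl (fun overlap_count cell_2 =>
            if cell_2.getD 0 0 == p.1 - 1 then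
              (if is_cell_overlapping_by_column cell_1 cell_2 = true then overlap_count + 1 else overlap_count)
            else overlap_count) 0 : Int)) table 0]
  rw [List.any_filter]
  simp only [countLoop_eq (fun c2 => c2.getD 0 0 == p.1 - 1)]
  have hfun : ∀ c : List Int, is_cell_overlapping_by_column c
      = fun q => (decide (c.getD 3 0 < q.getD 5 0) && decide (q.getD 3 0 < c.getD 5 0)) :=
    fun c => funext (overlap_eq c)
  simp [hfun, Nat.one_lt_cast]
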